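-- pv_equiv track=rewrite | github.com/mathias-madsen/LZW | LZW.py | compute_parser_state
-- ===== SOURCE A (Python) =====
-- def compute_parser_state(text, alphabet):
--     " (phrasebook, leftover characters) posterior to scanning the text "
--
--     phrasebook = alphabet[:]
--     register, tape = "", text
--
--     while tape:
--
--         # while nothing new happens, move forward:
--         while tape and (register + tape[0] in phrasebook):
--             register, tape = register + tape[0], tape[1:]
--
--         # learn a new word: the buffer + the lookahead:
--         if tape:
--             phrasebook.append(register + tape[0])
--
--         # flush the buffer:
--         if tape:
--             register = ""
--         else:
--             return phrasebook, register
-- ===== SOURCE B (Python) =====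
-- def compute_parser_state(text, alphabet):
--     " (phrasebook, leftover characters) posterior to scanning the text "
--     phrasebook = list(alphabet)
--     known = set(phrasebook)
--     register = ""
--     for c in text:
--         cand = register + c
--         if cand in known:
--             register = cand
--         else:
--             phrasebook.append(cand)
--             known.add(cand)
--             if c not in known:
--                 phrasebook.append(c)
--                 known.add(c)
--             register = c
--     return phrasebook, register
-- ===== Notes on version B (the rewrite author's own statement) =====
-- stated objective: faster
-- what changed: A's nested while loops re-scan the phrasebook list for each membership test and re-examine the lookahead character after every learned phrase; B makes a single pass over the characters, deciding each character exactly once, with a set kept alongside the phrase list for O(1) membership.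
-- outside the precondition, e.g. on compute_parser_state('', ['a']): A returns None, B returns (['a'], '')
import Mathlib
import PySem

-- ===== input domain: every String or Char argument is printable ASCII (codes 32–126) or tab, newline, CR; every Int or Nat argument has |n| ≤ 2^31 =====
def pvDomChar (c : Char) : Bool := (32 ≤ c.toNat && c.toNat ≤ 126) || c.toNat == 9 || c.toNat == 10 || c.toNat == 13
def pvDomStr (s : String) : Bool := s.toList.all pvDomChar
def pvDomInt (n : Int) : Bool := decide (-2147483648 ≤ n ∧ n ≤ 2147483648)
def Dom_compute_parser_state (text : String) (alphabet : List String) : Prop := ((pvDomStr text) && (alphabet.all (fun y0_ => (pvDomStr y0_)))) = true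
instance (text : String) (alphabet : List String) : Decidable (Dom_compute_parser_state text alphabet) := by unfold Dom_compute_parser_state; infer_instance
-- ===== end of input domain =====

-- B replaces A's nested while loops (which re-examine the lookahead char after each learned
-- phrase) by a single pass over the characters with a set alongside the phrase list; same value.

-- ===== PORT A =====
-- the inner 'while tape and (register + tape[0] in phrasebook)' loop; register/tape as char lists
def pvA_inner (P : List String) (r t : List Char) : List Char × List Char :=
  match t with
  | [] => (r, [])
  | h :: t' =>
    if String.ofList (r ++ [h]) ∈ P then pvA_inner P (r ++ [h]) t' else (r, h :: t')

-- termination measure for the outer while loop (used only by 'decreasing_by' below)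
def pvA_measure (P : List String) (r t : List Char) : Nat :=
  2 * t.length +
    (if r = [] then
      (match t with
       | h :: _ => if String.ofList [h] ∈ P then 0 else 1
       | [] => 0)
     else 2)

theorem pvA_inner_len (P : List String) (r t : List Char) :
    (pvA_inner P r t).2.length ≤ t.length := by
  induction t generalizing r with
  | nil => simp [pvA_inner]
  | cons h t' ih =>
    simp only [pvA_inner]
    split
    · exact le_trans (ih (r ++ [h])) (Nat.le_succ _)
    · simp

theorem pvA_inner_cases (P : List String) (r : List Char) (h : Char) (t' : List Char) :
    (pvA_inner P r (h :: t')).2.length ≤ t'.length ∨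
      (pvA_inner P r (h :: t') = (r, h :: t') ∧ String.ofList (r ++ [h]) ∉ P) := by
  simp only [pvA_inner]
  split
  · exact Or.inl (pvA_inner_len P (r ++ [h]) t')
  · next hn => exact Or.inr ⟨rfl, hn⟩

-- the outer 'while tape' loop of A: run the inner loop, then (if the tape is not exhausted)
-- learn register+lookahead and flush the register, without consuming the lookahead
def pvA_outer (P : List String) (r t : List Char) : List String × String :=
  match t with
  | [] => (P, String.ofList r)
  | h :: t' =>
    match hres : pvA_inner P r (h :: t') with
    | (r1, []) => (P, String.ofList r1)
    | (r1, h1 :: t1') => pvA_outer (P ++ [String.ofList (r1 ++ [h1])]) [] (h1 :: t1')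
termination_by pvA_measure P r t
decreasing_by
  rcases pvA_inner_cases P r h t' with hlen | ⟨heq, hnin⟩
  · rw [hres] at hlen
    simp only [List.length_cons] at hlen
    simp only [pvA_measure, List.length_cons, reduceIte]
    split_ifs <;> omega
  · rw [heq] at hres
    injection hres with e1 e2
    injection e2 with e3 e4
    rw [← e1, ← e3, ← e4]
    simp only [pvA_measure, List.length_cons, reduceIte]
    by_cases hr0 : r = []
    · subst hr0
      simp only [List.nil_append] at hnin ⊢
      have hm : String.ofList [h] ∈ P ++ [String.ofList [h]] := by simp
      rw [if_pos hm]
      simp only [if_true]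
      rw [if_neg hnin]
      omega
    · rw [if_neg hr0]
      split_ifs <;> omega

def compute_parser_state (text : String) (alphabet : List String) : List String × String :=
  pvA_outer alphabet [] text.toList

-- ===== PORT B =====
-- one pass: for each char, either extend the register, or learn the candidate (and, if new,
-- the single char too) and restart the register at that char, never revisiting a character
def pvB_loop (P : List String) (known : PySem.Set String) (r t : List Char) : List String × String :=
  match t with
  | [] => (P, String.ofList r)
  | c :: t' =>
    let cand := String.ofList (r ++ [c])
    if PySem.Set.contains known cand then pvB_loop P known (r ++ [c]) t'
    else
      let P1 := P ++ [cand]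
      let k1 := PySem.Set.add known cand
      if PySem.Set.contains k1 (String.ofList [c]) then pvB_loop P1 k1 [c] t'
      else pvB_loop (P1 ++ [String.ofList [c]]) (PySem.Set.add k1 (String.ofList [c])) [c] t'

def compute_parser_state_alt (text : String) (alphabet : List String) : List String × String :=
  pvB_loop alphabet (PySem.Set.ofList alphabet) [] text.toList

-- ===== PRECONDITION & SPEC =====
-- Pre_ excludes only the empty text, on which A falls through its while loop and returns None
-- instead of a (phrasebook, leftover) pair; B returns the natural (list(alphabet), "") there.
def Pre_compute_parser_state (text : String) (alphabet : List String) : Prop :=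
  text ≠ ""
instance (text : String) (alphabet : List String) : Decidable (Pre_compute_parser_state text alphabet) := by unfold Pre_compute_parser_state; infer_instance

def pvWitness_compute_parser_state : String × List String := ("abab", ["a", "b"])

def Spec_compute_parser_state (text : String) (alphabet : List String) (out : List String × String) : Prop := out = compute_parser_state_alt text alphabet
instance (text : String) (alphabet : List String) (out : List String × String) : Decidable (Spec_compute_parser_state text alphabet out) := by unfold Spec_compute_parser_state; infer_instance

-- ===== CLAIM (what is proved, stated in full; the proofs are below) =====
def Claim_equal_compute_parser_state : Prop := ∀ (text : String) (alphabet : List String), Dom_compute_parser_state text alphabet → Pre_compute_parser_state text alphabet → Spec_compute_parser_state text alphabet (compute_parser_state text alphabet)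

-- ===== LEMMAS AND PROOFS =====

-- one outer iteration of A, read one character-decision at a time
theorem pvA_step (P : List String) (r : List Char) (c : Char) (t' : List Char) :
    pvA_outer P r (c :: t') =
      if String.ofList (r ++ [c]) ∈ P then pvA_outer P (r ++ [c]) t'
      else pvA_outer (P ++ [String.ofList (r ++ [c])]) [] (c :: t') := by
  conv_lhs => rw [pvA_outer]
  by_cases hc : String.ofList (r ++ [c]) ∈ P
  · rw [if_pos hc]
    have hin : pvA_inner P r (c :: t') = pvA_inner P (r ++ [c]) t' := by
      conv_lhs => rw [pvA_inner]
      rw [if_pos hc]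
    split
    · next r1 hres =>
      rw [hin] at hres
      cases t' with
      | nil =>
        rw [pvA_outer]
        have h1 : r1 = r ++ [c] := by
          have := congrArg Prod.fst hres
          simpa only [pvA_inner] using this.symm
        rw [h1]
      | cons d t'' =>
        conv_rhs => rw [pvA_outer]
        split
        · next r2 hres2 =>
          rw [hres] at hres2
          injection hres2 with e1 _
          rw [e1]
        · next r2 h2 t2 hres2 =>
          rw [hres] at hres2
          simp at hres2
    · next r1 h1 t1 hres =>
      rw [hin] at hres
      cases t' with
      | nil =>
        simp only [pvA_inner] at hres
        simp at hres
      | cons d t'' =>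
        conv_rhs => rw [pvA_outer]
        split
        · next r2 hres2 =>
          rw [hres] at hres2
          simp at hres2
        · next r2 h2 t2 hres2 =>
          rw [hres] at hres2
          injection hres2 with e1 e2
          injection e2 with e3 e4
          rw [e1, e3, e4]
  · rw [if_neg hc]
    have hin : pvA_inner P r (c :: t') = (r, c :: t') := by
      conv_lhs => rw [pvA_inner]
      rw [if_neg hc]
    split
    · next r1 hres =>
      rw [hin] at hres
      simp at hres
    · next r1 h1 t1 hres =>
      rw [hin] at hres
      injection hres with e1 e2
      injection e2 with e3 e4
      rw [← e1, ← e3, ← e4]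

theorem pvAB_eq (t : List Char) (P : List String) (known : PySem.Set String) (r : List Char)
    (inv : ∀ s : String, s ∈ known ↔ s ∈ P) :
    pvA_outer P r t = pvB_loop P known r t := by
  induction t generalizing P known r with
  | nil => rw [pvA_outer, pvB_loop]
  | cons c t' ih =>
    rw [pvA_step, pvB_loop]
    by_cases hc : String.ofList (r ++ [c]) ∈ P
    · rw [if_pos hc]
      have hcont : PySem.Set.contains known (String.ofList (r ++ [c])) = true :=
        (PySem.Set.contains_iff known _).mpr ((inv _).mpr hc)
      simp only [hcont, if_true]
      exact ih P known (r ++ [c]) inv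
    · rw [if_neg hc]
      have hck : String.ofList (r ++ [c]) ∉ known := fun h => hc ((inv _).mp h)
      have hcont : PySem.Set.contains known (String.ofList (r ++ [c])) = false := by
        rw [← Bool.not_eq_true]
        exact fun h => hck ((PySem.Set.contains_iff known _).mp h)
      simp only [hcont, Bool.false_eq_true, if_false]
      have inv1 : ∀ s : String,
          s ∈ PySem.Set.add known (String.ofList (r ++ [c])) ↔
            s ∈ P ++ [String.ofList (r ++ [c])] := by
        intro s
        rw [PySem.Set.mem_add known _ s]
        simp [inv s]
      rw [pvA_step]
      simp only [List.nil_append]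
      by_cases h2 : String.ofList [c] ∈ P ++ [String.ofList (r ++ [c])]
      · rw [if_pos h2]
        have hcont2 : PySem.Set.contains (PySem.Set.add known (String.ofList (r ++ [c])))
            (String.ofList [c]) = true :=
          (PySem.Set.contains_iff _ _).mpr ((inv1 _).mpr h2)
        simp only [hcont2, if_true]
        exact ih _ _ [c] inv1
      · rw [if_neg h2]
        have hk2 : String.ofList [c] ∉ PySem.Set.add known (String.ofList (r ++ [c])) :=
          fun h => h2 ((inv1 _).mp h)
        have hcont2 : PySem.Set.contains (PySem.Set.add known (String.ofList (r ++ [c])))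
            (String.ofList [c]) = false := by
          rw [← Bool.not_eq_true]
          exact fun h => hk2 ((PySem.Set.contains_iff _ _).mp h)
        simp only [hcont2, Bool.false_eq_true, if_false]
        rw [pvA_step]
        have h3 : String.ofList ([] ++ [c]) ∈ (P ++ [String.ofList (r ++ [c])]) ++ [String.ofList [c]] := by
          simp
        simp only [List.nil_append] at h3 ⊢
        rw [if_pos h3]
        have inv2 : ∀ s : String,
            s ∈ PySem.Set.add (PySem.Set.add known (String.ofList (r ++ [c]))) (String.ofList [c]) ↔
              s ∈ (P ++ [String.ofList (r ++ [c])]) ++ [String.ofList [c]] := by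
          intro s
          rw [PySem.Set.mem_add _ _ s]
          simp only [List.mem_append, List.mem_singleton, inv1 s]
        exact ih _ _ [c] inv2

-- ===== VERDICT (by name: the statement is the Claim_ definition above) =====
theorem compute_parser_state_spec : Claim_equal_compute_parser_state := by
  intro text alphabet _dom _pre
  unfold Spec_compute_parser_state compute_parser_state compute_parser_state_alt
  exact pvAB_eq text.toList alphabet (PySem.Set.ofList alphabet) []
    (fun s => PySem.Set.mem_ofList alphabet s)
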